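-- pv_equiv track=rewrite | github.com/buyibuyi001/algorithm | getPointOfwords.py | getPointOfwords
-- ===== SOURCE A (Python) =====
-- def getPointOfwords(n,m,aListRem,aListAll):
--     aListRemSet=set(aListRem)
--     aListAllSet=set(aListAll)
--     point=0
--     for item in aListRemSet:
--         if item in aListAllSet:
--             point=point+(len(item))**2
--
--     return point
-- ===== SOURCE B (Python) =====
-- def getPointOfwords(n, m, aListRem, aListAll):
--     r = sorted(set(aListRem))
--     a = sorted(set(aListAll))
--     i = j = 0
--     total = 0
--     while i < len(r) and j < len(a):
--         if r[i] < a[j]: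
--             i += 1
--         elif a[j] < r[i]:
--             j += 1
--         else:
--             total += len(r[i]) ** 2
--             i += 1
--             j += 1
--     return total
-- ===== Notes on version B (the rewrite author's own statement) =====
-- stated objective: alternative
-- what changed: Computes the intersection by sorting both deduplicated lists and summing squared lengths in a two-pointer ordered merge, instead of hash-set membership tests in a loop over one set.
import Mathlib
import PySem

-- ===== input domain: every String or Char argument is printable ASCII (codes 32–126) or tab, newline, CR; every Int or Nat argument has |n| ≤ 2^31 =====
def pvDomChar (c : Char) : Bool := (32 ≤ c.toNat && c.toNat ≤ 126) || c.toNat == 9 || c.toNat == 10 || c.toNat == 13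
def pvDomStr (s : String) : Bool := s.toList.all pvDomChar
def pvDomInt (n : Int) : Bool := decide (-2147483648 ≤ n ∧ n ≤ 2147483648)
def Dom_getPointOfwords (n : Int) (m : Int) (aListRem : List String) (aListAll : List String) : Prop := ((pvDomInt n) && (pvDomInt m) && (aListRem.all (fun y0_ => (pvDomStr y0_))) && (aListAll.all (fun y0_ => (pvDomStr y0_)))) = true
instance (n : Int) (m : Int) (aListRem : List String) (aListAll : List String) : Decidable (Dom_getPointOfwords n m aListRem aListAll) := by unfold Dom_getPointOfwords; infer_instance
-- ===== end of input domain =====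

-- B replaces A's hash-set membership loop by a sorted two-pointer merge over the deduplicated lists (alternative algorithm, same result).


-- ===== PORT A =====
-- set iteration order is not modelled; the fold is order-insensitive (a sum of per-element contributions)
def getPointOfwords (n : Int) (m : Int) (aListRem : List String) (aListAll : List String) : Int :=
  let aListRemSet : PySem.Set String := PySem.Set.ofList aListRem
  let aListAllSet : PySem.Set String := PySem.Set.ofList aListAll
  aListRemSet.foldl
    (fun point item =>
      if PySem.Set.contains aListAllSet item then point + (PySem.Str.len item) ^ 2 else point) 0

-- ===== PORT B =====
-- while-loop over two index pointers, transcribed as structural recursion on the two sorted lists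
def pvMergeSum : List String → List String → Int
  | [], _ => 0
  | _ :: _, [] => 0
  | x :: xs, y :: ys =>
    if x < y then pvMergeSum xs (y :: ys)
    else if y < x then pvMergeSum (x :: xs) ys
    else (PySem.Str.len x) ^ 2 + pvMergeSum xs ys
termination_by r a => r.length + a.length

def getPointOfwords_alt (n : Int) (m : Int) (aListRem : List String) (aListAll : List String) : Int :=
  let r := PySem.List.sorted (PySem.Set.ofList aListRem) (fun x => x) false
  let a := PySem.List.sorted (PySem.Set.ofList aListAll) (fun x => x) false
  pvMergeSum r a

-- ===== PRECONDITION & SPEC =====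
def Spec_getPointOfwords (n : Int) (m : Int) (aListRem : List String) (aListAll : List String) (out : Int) : Prop := out = getPointOfwords_alt n m aListRem aListAll
instance (n : Int) (m : Int) (aListRem : List String) (aListAll : List String) (out : Int) : Decidable (Spec_getPointOfwords n m aListRem aListAll out) := by unfold Spec_getPointOfwords; infer_instance

-- ===== CLAIM (what is proved, stated in full; the proofs are below) =====
def Claim_equal_getPointOfwords : Prop := ∀ (n : Int) (m : Int) (aListRem : List String) (aListAll : List String), Dom_getPointOfwords n m aListRem aListAll → Spec_getPointOfwords n m aListRem aListAll (getPointOfwords n m aListRem aListAll)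

-- ===== LEMMAS AND PROOFS =====

-- the merge of two strictly increasing lists sums the squared lengths of their common elements
theorem pvMergeSum_eq (r a : List String) (hr : r.Pairwise (· < ·)) (ha : a.Pairwise (· < ·)) :
    pvMergeSum r a = ((r.filter (fun x => a.contains x)).map (fun s => (PySem.Str.len s) ^ 2)).sum := by
  fun_induction pvMergeSum r a with
  | case1 a => simp
  | case2 x xs => simp
  | case3 x xs y ys hxy ih =>
    have hx : (y :: ys).contains x = false := by
      simp only [List.contains_eq_any_beq, List.any_eq_false]
      intro e he hbe
      have : x = e := by simpa using hbe
      subst this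
      rcases List.mem_cons.mp he with h | h
      · exact (ne_of_lt hxy) h
      · exact absurd (lt_trans hxy (List.rel_of_pairwise_cons ha h)) (lt_irrefl x)
    rw [List.filter_cons, hx]
    simpa using ih hr.tail ha
  | case4 x xs y ys hxy hyx ih =>
    have hcong : ∀ e ∈ x :: xs, (y :: ys).contains e = ys.contains e := by
      intro e he
      have hye : y < e := by
        rcases List.mem_cons.mp he with h | h
        · exact h ▸ hyx
        · exact lt_trans hyx (List.rel_of_pairwise_cons hr h)
      simp [(ne_of_lt hye).symm]
    rw [List.filter_congr hcong]
    exact ih hr ha.tail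
  | case5 x xs y ys hxy hyx ih =>
    have hxey : x = y := le_antisymm (not_lt.mp hyx) (not_lt.mp hxy)
    subst hxey
    have hcong : ∀ e ∈ xs, (e == x || ys.contains e) = ys.contains e := by
      intro e he
      have hxe : x < e := List.rel_of_pairwise_cons hr he
      simp [(ne_of_lt hxe).symm]
    rw [List.filter_cons]
    simp only [List.contains_cons, BEq.rfl, Bool.true_or, if_pos]
    rw [List.filter_congr hcong, ih hr.tail ha.tail]
    simp only [List.map_cons, List.sum_cons]

theorem pvFoldl_if_eq (l : List String) (p : String → Bool) (init : Int) :
    l.foldl (fun point item => if p item then point + (PySem.Str.len item) ^ 2 else point) init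
      = init + ((l.filter p).map (fun s => (PySem.Str.len s) ^ 2)).sum := by
  induction l generalizing init with
  | nil => simp
  | cons x xs ih =>
    rw [List.foldl_cons, ih, List.filter_cons]
    by_cases h : p x = true
    · simp [h, add_assoc]
    · simp [h]

-- ===== VERDICT (by name: the statement is the Claim_ definition above) =====
theorem getPointOfwords_spec : Claim_equal_getPointOfwords := by
  intro n m aListRem aListAll _
  unfold Spec_getPointOfwords getPointOfwords getPointOfwords_alt
  dsimp only
  rw [pvMergeSum_eq _ _ (PySem.List.sorted_ofList_pairwise_lt aListRem)
        (PySem.List.sorted_ofList_pairwise_lt aListAll)]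
  rw [pvFoldl_if_eq]
  have hc : ∀ e ∈ PySem.List.sorted (PySem.Set.ofList aListRem) (fun x => x) false,
      ((PySem.List.sorted (PySem.Set.ofList aListAll) (fun x => x) false).contains e)
        = (PySem.Set.contains (PySem.Set.ofList aListAll) e) := by
    intro e _
    show _ = List.contains _ e
    by_cases h : e ∈ PySem.Set.ofList aListAll
    · rw [List.contains_iff_mem.mpr ((PySem.List.mem_sorted _ _ _ _).mpr h),
          List.contains_iff_mem.mpr h]
    · rw [Bool.eq_false_iff.mpr (fun hk => h ((PySem.List.mem_sorted _ _ _ _).mp (List.contains_iff_mem.mp hk))),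
          Bool.eq_false_iff.mpr (fun hk => h (List.contains_iff_mem.mp hk))]
  rw [List.filter_congr hc]
  have hperm := ((PySem.List.sorted_perm (PySem.Set.ofList aListRem) (fun x => x) false).filter
      (fun x => PySem.Set.contains (PySem.Set.ofList aListAll) x)).map (fun s => (PySem.Str.len s) ^ 2)
  rw [hperm.sum_eq, zero_add]
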